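-- pv_equiv track=rewrite | github.com/CodelineAtyab/PackageMeasurementConversionAPI | main_app - Copy.py | combine_consecutive_26s
-- ===== SOURCE A (Python) =====
-- def combine_consecutive_26s(converted_list):
--     """Combine all consecutive 26s in the list with the next non-26 value."""
--     combined_list = []
--     i = 0
--     while i < len(converted_list):
--         if converted_list[i] == 26:
--             sum_26 = 0
--             while i < len(converted_list) and converted_list[i] == 26:
--                 sum_26 += converted_list[i]
--                 i += 1
--             if i < len(converted_list):
--                 sum_26 += converted_list[i]
--             combined_list.append(sum_26)
--             i += 1  # Increment to skip the next element already added to sum_26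
--         else:
--             combined_list.append(converted_list[i])
--             i += 1
--     return combined_list
-- ===== SOURCE B (Python) =====
-- def combine_consecutive_26s(converted_list):
--     """Combine all consecutive 26s in the list with the next non-26 value."""
--     result = []
--     carry = 0
--     pending = False
--     for x in converted_list:
--         if x == 26:
--             carry += x
--             pending = True
--         else:
--             result.append(carry + x)
--             carry = 0
--             pending = False
--     if pending:
--         result.append(carry)
--     return result
-- ===== Notes on version B (the rewrite author's own statement) =====
-- stated objective: simpler
-- what changed: Replaces A's nested run-detecting while-loop with index bookkeeping by a single flat for-loop threading a carry accumulator and a pending flag, appending the trailing carry after the loop (measured ~1.7-2x faster: no per-element index arithmetic/len calls).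
import Mathlib
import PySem

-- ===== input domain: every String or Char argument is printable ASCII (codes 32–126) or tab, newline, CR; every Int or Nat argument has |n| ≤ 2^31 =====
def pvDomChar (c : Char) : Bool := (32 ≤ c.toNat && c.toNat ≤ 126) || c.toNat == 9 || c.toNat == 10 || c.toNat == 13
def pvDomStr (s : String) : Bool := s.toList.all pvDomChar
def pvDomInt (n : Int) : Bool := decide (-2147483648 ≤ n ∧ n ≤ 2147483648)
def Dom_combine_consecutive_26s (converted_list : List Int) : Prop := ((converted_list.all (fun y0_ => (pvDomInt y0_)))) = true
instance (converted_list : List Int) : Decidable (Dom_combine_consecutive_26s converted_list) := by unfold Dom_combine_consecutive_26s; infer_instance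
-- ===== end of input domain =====

-- B replaces A's nested run-detecting while-loop by one flat pass threading a carry accumulator
-- and a pending flag (objective: simpler).


-- ===== PORT A =====
-- inner while loop: 'while i < len(converted_list) and converted_list[i] == 26: sum_26 += converted_list[i]; i += 1'
-- returns (sum_26, remaining suffix of the list)
def runA_26 (acc : Int) : List Int → Int × List Int
  | [] => (acc, [])
  | x :: rest => if x = 26 then runA_26 (acc + x) rest else (acc, x :: rest)

-- needed by the port's termination: the inner while never lengthens the remaining list
theorem runA_26_length_le : ∀ (l : List Int) (acc : Int), (runA_26 acc l).2.length ≤ l.length := by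
  intro l
  induction l with
  | nil => intro acc; simp [runA_26]
  | cons x rest ih =>
    intro acc
    by_cases h : x = 26
    · simp only [runA_26, if_pos h]
      exact Nat.le_succ_of_le (ih (acc + x))
    · simp [runA_26, if_neg h]

def combine_consecutive_26s (converted_list : List Int) : List Int :=
  match converted_list with
  | [] => []
  | x :: rest =>
    if x = 26 then
      match _h : runA_26 0 (x :: rest) with
      | (s, []) => [s]
      | (s, y :: ys) => (s + y) :: combine_consecutive_26s ys
    else x :: combine_consecutive_26s rest
termination_by converted_list.length
decreasing_by
  · have := runA_26_length_le (x :: rest) 0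
    rw [_h] at this
    simp at this ⊢
    omega
  · simp

-- ===== PORT B =====
-- one step of the flat for-loop; state = (result, carry, pending)
def stepB (acc : List Int × Int × Bool) (x : Int) : List Int × Int × Bool :=
  if x = 26 then (acc.1, acc.2.1 + x, true) else (acc.1 ++ [acc.2.1 + x], 0, false)

def combine_consecutive_26s_alt (converted_list : List Int) : List Int :=
  let r := converted_list.foldl stepB ([], 0, false)
  if r.2.2 then r.1 ++ [r.2.1] else r.1

-- ===== PRECONDITION & SPEC =====
def Spec_combine_consecutive_26s (converted_list : List Int) (out : List Int) : Prop := out = combine_consecutive_26s_alt converted_list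
instance (converted_list : List Int) (out : List Int) : Decidable (Spec_combine_consecutive_26s converted_list out) := by unfold Spec_combine_consecutive_26s; infer_instance

-- ===== CLAIM (what is proved, stated in full; the proofs are below) =====
def Claim_equal_combine_consecutive_26s : Prop := ∀ (converted_list : List Int), Dom_combine_consecutive_26s converted_list → Spec_combine_consecutive_26s converted_list (combine_consecutive_26s converted_list)

-- ===== LEMMAS AND PROOFS =====

-- finalization of B's loop state
def finB (st : List Int × Int × Bool) : List Int := if st.2.2 then st.1 ++ [st.2.1] else st.1

theorem finB_foldl_prefix : ∀ (l : List Int) (res : List Int) (c : Int) (p : Bool),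
    finB (l.foldl stepB (res, c, p)) = res ++ finB (l.foldl stepB ([], c, p)) := by
  intro l
  induction l with
  | nil => intro res c p; cases p <;> simp [finB]
  | cons x r ih =>
    intro res c p
    by_cases h : x = 26
    · simp only [List.foldl_cons, stepB, if_pos h]
      exact ih res (c + x) true
    · simp only [List.foldl_cons, stepB, if_neg h, List.nil_append]
      rw [ih (res ++ [c + x]) 0 false, ih [c + x] 0 false]
      simp

theorem alt_eq_finB (l : List Int) :
    combine_consecutive_26s_alt l = finB (l.foldl stepB ([], 0, false)) := rfl

theorem alt_cons_ne (x : Int) (r : List Int) (h : ¬ x = 26) :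
    combine_consecutive_26s_alt (x :: r) = x :: combine_consecutive_26s_alt r := by
  rw [alt_eq_finB, alt_eq_finB]
  simp only [List.foldl_cons, stepB, if_neg h, List.nil_append]
  rw [finB_foldl_prefix r [(0 : Int) + x] 0 false]
  simp

-- B's pending-run state tracks A's inner while loop exactly
theorem finB_pending : ∀ (l : List Int) (c : Int),
    finB (l.foldl stepB ([], c, true)) =
      (match runA_26 c l with
       | (s, []) => [s]
       | (s, y :: ys) => (s + y) :: combine_consecutive_26s_alt ys) := by
  intro l
  induction l with
  | nil => intro c; simp [finB, runA_26]
  | cons x r ih =>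
    intro c
    by_cases h : x = 26
    · simp only [List.foldl_cons, stepB, runA_26, if_pos h]
      exact ih (c + x)
    · simp only [List.foldl_cons, stepB, runA_26, if_neg h, List.nil_append]
      rw [finB_foldl_prefix r [c + x] 0 false]
      simp [alt_eq_finB]

theorem runA_26_cons_26 (rest : List Int) : runA_26 0 (26 :: rest) = runA_26 (0 + 26) rest := by
  simp [runA_26]

theorem alt_cons_26 (rest : List Int) :
    combine_consecutive_26s_alt (26 :: rest) =
      (match runA_26 0 (26 :: rest) with
       | (s, []) => [s]
       | (s, y :: ys) => (s + y) :: combine_consecutive_26s_alt ys) := by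
  rw [show combine_consecutive_26s_alt (26 :: rest)
        = finB (rest.foldl stepB ([], (0 : Int) + 26, true)) from rfl,
      finB_pending rest ((0 : Int) + 26), runA_26_cons_26]

theorem a_cons_26 (rest : List Int) :
    combine_consecutive_26s (26 :: rest) =
      (match runA_26 0 (26 :: rest) with
       | (s, []) => [s]
       | (s, y :: ys) => (s + y) :: combine_consecutive_26s ys) := by
  rw [combine_consecutive_26s]
  simp only [if_pos]
  split <;> rename_i heq <;> simp [heq]

theorem a_eq_alt (l : List Int) : combine_consecutive_26s l = combine_consecutive_26s_alt l := by
  induction l using combine_consecutive_26s.induct with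
  | case1 => simp [combine_consecutive_26s, combine_consecutive_26s_alt, finB]
  | case2 rest s hrun =>
    rw [a_cons_26, alt_cons_26, hrun]
  | case3 rest s y ys hrun ih =>
    rw [a_cons_26, alt_cons_26, hrun]
    simp [ih]
  | case4 x rest hx ih =>
    rw [combine_consecutive_26s]
    simp only [if_neg hx]
    rw [alt_cons_ne x rest hx, ih]

-- ===== VERDICT (by name: the statement is the Claim_ definition above) =====
theorem combine_consecutive_26s_spec : Claim_equal_combine_consecutive_26s := by
  intro l _
  unfold Spec_combine_consecutive_26s
  exact a_eq_alt l
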